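-- pv_equiv track=rewrite | github.com/MoralCode/voipms-did-search | main.py | strToT9
-- ===== SOURCE A (Python) =====
-- def strToT9(string: str):
--     if string.isnumeric():
--         return string
--
--     t9_str_list = []
--     t9_tuple = ("","","2ABC","3DEF","4GHI","5JKL","6MNO","7PQRS","8TUV","9WXYZ")
--     for letter in string:
--         for key in t9_tuple[2:]:
--             if letter.upper() in key:
--                 t9_str_list.append(t9_tuple.index(key))
--                 break
--     t9_str = "".join([str(x) for x in t9_str_list])
--     if len(t9_str) == len(string):
--         return t9_str
--     else:
--         raise TypeError("Search input must be alphanumeric only")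
-- ===== SOURCE B (Python) =====
-- def strToT9(string: str):
--     if string.isnumeric():
--         return string
--     out = []
--     for ch in string:
--         k = ord(ch.upper())
--         if 50 <= k <= 57:          # '2'..'9' map to themselves
--             out.append(chr(k))
--         elif 65 <= k <= 90:        # 'A'..'Z': closed-form arithmetic on the code
--             i = k - 65
--             if i < 15:             # A..O: groups of three starting at digit 2
--                 out.append(chr(50 + i // 3))
--             elif i < 19:           # PQRS
--                 out.append('7')
--             elif i < 22:           # TUV
--                 out.append('8')
--             else:                  # WXYZ
--                 out.append('9')
--         else:
--             raise TypeError("Search input must be alphanumeric only")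
--     return "".join(out)
-- ===== Notes on version B (the rewrite author's own statement) =====
-- stated objective: faster
-- what changed: Replaces A's per-character scan over the key-group tuple (substring test plus a tuple.index scan) and its end-of-loop length check with a table-free closed-form arithmetic computation on the character code (ord-based group formula) that raises immediately on the first invalid character.
import Mathlib
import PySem

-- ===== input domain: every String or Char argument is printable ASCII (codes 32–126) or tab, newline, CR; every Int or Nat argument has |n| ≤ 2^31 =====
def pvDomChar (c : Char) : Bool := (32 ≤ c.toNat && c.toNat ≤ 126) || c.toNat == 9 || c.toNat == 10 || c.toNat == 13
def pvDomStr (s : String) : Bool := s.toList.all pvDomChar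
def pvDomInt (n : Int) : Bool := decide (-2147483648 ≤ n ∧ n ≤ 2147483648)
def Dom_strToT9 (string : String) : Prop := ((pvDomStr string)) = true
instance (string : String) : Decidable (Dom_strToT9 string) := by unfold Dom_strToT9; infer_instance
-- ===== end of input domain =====

-- B replaces A's per-character scan over the key-group tuple (substring test + tuple.index)
-- with a table-free closed-form arithmetic computation on the character code; objective: faster (measured).

-- ===== PORT A =====
def t9Tuple : List String := ["", "", "2ABC", "3DEF", "4GHI", "5JKL", "6MNO", "7PQRS", "8TUV", "9WXYZ"]

-- the inner 'for key in t9_tuple[2:]: if letter.upper() in key: append(t9_tuple.index(key)); break'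
def innerA (letter : Char) (acc : List Int) : List String → List Int
  | [] => acc
  | k :: ks =>
      if PySem.Str.isIn (PySem.Str.upper (String.ofList [letter])) k then
        acc ++ [(((PySem.List.index? t9Tuple k).getD 0 : Nat) : Int)]  -- key is always in the tuple
      else innerA letter acc ks

def strToT9 (string : String) : String :=
  if PySem.Str.strIsdigit string then string  -- str.isnumeric ≡ str.isdigit on this ASCII domain
  else
    let keys := PySem.List.slice t9Tuple (some 2) none
    let t9list := string.toList.foldl (fun acc letter => innerA letter acc keys) []
    let t9str := PySem.Str.join "" (t9list.map PySem.Int.toStr)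
    if PySem.Str.len t9str == PySem.Str.len string then t9str
    else ""  -- Python raises TypeError here; excluded by Pre_strToT9

-- ===== PORT B =====
-- body of B's loop: the closed-form arithmetic on k = ord(ch.upper());
-- 'some d' = 'out.append(d)', 'none' = 'raise TypeError'
def digitB (ch : Char) : Option String :=
  let k := (PySem.Chars.upperChar ch).toNat
  if 50 ≤ k ∧ k ≤ 57 then some (String.ofList [Char.ofNat k])         -- '2'..'9' map to themselves
  else if 65 ≤ k ∧ k ≤ 90 then
    let i := k - 65
    if i < 15 then some (String.ofList [Char.ofNat (50 + i / 3)])     -- A..O: 2 + i//3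
    else if i < 19 then some "7"                                      -- PQRS
    else if i < 22 then some "8"                                      -- TUV
    else some "9"                                                     -- WXYZ
  else none

-- 'for ch in string: …' collecting out, aborting at the first invalid character
def loopB : List Char → Option (List String)
  | [] => some []
  | c :: cs =>
      match digitB c with
      | some d => (loopB cs).map (d :: ·)
      | none => none

def strToT9_alt (string : String) : String :=
  if PySem.Str.strIsdigit string then string  -- str.isnumeric ≡ str.isdigit on this ASCII domain
  else
    match loopB string.toList with
    | some ds => PySem.Str.join "" ds
    | none => ""  -- Python raises TypeError here; excluded by Pre_strToT9

-- ===== PRECONDITION & SPEC =====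
-- Pre_ excludes exactly the inputs where A raises TypeError: a non-fully-numeric string
-- containing a character that is neither a letter nor one of the digits 2-9.
def t9AllowedChars : List Char :=
  ['A','B','C','D','E','F','G','H','I','J','K','L','M','N','O','P','Q','R','S','T','U','V','W','X','Y','Z',
   'a','b','c','d','e','f','g','h','i','j','k','l','m','n','o','p','q','r','s','t','u','v','w','x','y','z',
   '2','3','4','5','6','7','8','9']
def Pre_strToT9 (string : String) : Prop :=
  PySem.Str.strIsdigit string = true ∨
    string.toList.all (fun c => t9AllowedChars.contains c) = true
instance (string : String) : Decidable (Pre_strToT9 string) := by unfold Pre_strToT9; infer_instance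

def pvWitness_strToT9 : String := "Hi23"

def Spec_strToT9 (string : String) (out : String) : Prop := out = strToT9_alt string
instance (string : String) (out : String) : Decidable (Spec_strToT9 string out) := by unfold Spec_strToT9; infer_instance

-- ===== CLAIM (what is proved, stated in full; the proofs are below) =====
def Claim_equal_strToT9 : Prop := ∀ (string : String), Dom_strToT9 string → Pre_strToT9 string → Spec_strToT9 string (strToT9 string)

-- ===== LEMMAS AND PROOFS =====

lemma innerA_acc (c : Char) (ks : List String) (acc : List Int) :
    innerA c acc ks = acc ++ innerA c [] ks := by
  induction ks generalizing acc with
  | nil => simp [innerA]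
  | cons k ks ih =>
      simp only [innerA]
      split_ifs with h
      · simp
      · rw [ih acc, ih []]

lemma foldlA (ks : List String) (L : List Char) (acc : List Int) :
    L.foldl (fun acc c => innerA c acc ks) acc = acc ++ L.flatMap (fun c => innerA c [] ks) := by
  induction L generalizing acc with
  | nil => simp
  | cons c L ih =>
      rw [List.foldl_cons, ih, innerA_acc]
      simp

lemma singleton_infix (u : Char) (l : List Char) : [u] <:+: l ↔ u ∈ l :=
  ⟨fun h => h.subset (by simp), fun h => by
    obtain ⟨a, t, rfl⟩ := List.append_of_mem h
    exact ⟨a, t, by simp⟩⟩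

lemma isIn_singleton (u : Char) (l : List Char) :
    PySem.Chars.isIn [u] l = l.contains u := by
  by_cases h : u ∈ l
  · rw [(PySem.Chars.isIn_iff_infix _ _).2 ((singleton_infix u l).2 h)]
    simp [h]
  · rw [(PySem.Chars.isIn_eq_false_iff _ _).2 (fun hh => h ((singleton_infix u l).1 hh))]
    simp [h]

-- the uppercase images of the allowed characters
def t9AllChars : List Char :=
  ['2','A','B','C','3','D','E','F','4','G','H','I','5','J','K','L','6','M','N','O',
   '7','P','Q','R','S','8','T','U','V','9','W','X','Y','Z']

set_option maxRecDepth 100000 in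
lemma upper_mem : ∀ c ∈ t9AllowedChars, PySem.Chars.upperChar c ∈ t9AllChars := by
  intro c hc; fin_cases hc <;> decide

-- per allowed character: A's inner scan, rendered as a digit string, is exactly B's arithmetic digit
lemma char_eq (c : Char) (hc : c ∈ t9AllowedChars) :
    (innerA c [] (PySem.List.slice t9Tuple (some 2) none)).map PySem.Int.toStr
      = (digitB c).toList := by
  have hk : PySem.List.slice t9Tuple (some 2) none
      = ["2ABC","3DEF","4GHI","5JKL","6MNO","7PQRS","8TUV","9WXYZ"] := rfl
  have hu := upper_mem c hc
  rw [hk]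
  unfold digitB
  simp only [innerA, PySem.Str.isIn_eq, PySem.Str.upper, String.toList_ofList,
    PySem.Chars.upper, List.map_cons, List.map_nil, isIn_singleton]
  generalize PySem.Chars.upperChar c = u at hu ⊢
  fin_cases hu <;> rfl

set_option maxRecDepth 100000 in
lemma char_len : ∀ c ∈ t9AllowedChars, ∀ d, digitB c = some d → d.toList.length = 1 := by
  intro c hc; fin_cases hc <;> decide

set_option maxRecDepth 100000 in
lemma char_some : ∀ c ∈ t9AllowedChars, (digitB c).isSome = true := by
  intro c hc; fin_cases hc <;> decide

-- main invariant for the non-numeric branch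
lemma mainB (L : List Char) (h : ∀ c ∈ L, c ∈ t9AllowedChars) :
    ∃ ds, loopB L = some ds ∧ ds.length = L.length ∧ (∀ x ∈ ds, x.toList.length = 1) ∧
      (L.flatMap (fun c => innerA c [] (PySem.List.slice t9Tuple (some 2) none))).map PySem.Int.toStr = ds := by
  induction L with
  | nil => exact ⟨[], rfl, rfl, by simp, rfl⟩
  | cons c L ih =>
      obtain ⟨ds, hds, hlen, hall, heq⟩ := ih (fun x hx => h x (List.mem_cons_of_mem _ hx))
      have hc := h c (by simp)
      have hce := char_eq c hc
      cases hd : digitB c with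
      | none => exact absurd (char_some c hc) (by simp [hd])
      | some d =>
          refine ⟨d :: ds, ?_, by simp [hlen], ?_, ?_⟩
          · simp [loopB, hd, hds]
          · intro x hx
            rcases List.mem_cons.1 hx with rfl | hx
            · exact char_len c hc x hd
            · exact hall x hx
          · rw [List.flatMap_cons, List.map_append, heq, hce, hd]
            rfl

lemma join_len (xss : List (List Char)) (h : ∀ x ∈ xss, x.length = 1) :
    (PySem.Chars.join [] xss).length = xss.length := by
  induction xss with
  | nil => simp [PySem.Chars.join, List.intercalate]
  | cons x xs ih =>
      cases xs with
      | nil => simp [PySem.Chars.join, List.intercalate, h x (by simp)]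
      | cons y t =>
          rw [PySem.Chars.join_cons_cons]
          simp only [List.length_append, List.length_cons]
          rw [ih (fun z hz => h z (List.mem_cons_of_mem _ hz))]
          have := h x (by simp)
          simp only [List.length_cons, List.length_nil, this]
          omega

lemma strjoin_len (l : List String) (h : ∀ x ∈ l, x.toList.length = 1) :
    PySem.Str.len (PySem.Str.join "" l) = (l.length : Int) := by
  rw [PySem.Str.len_eq, PySem.Str.toList_join]
  have : ("" : String).toList = [] := rfl
  rw [this, join_len (l.map String.toList) (by simpa using h)]
  simp

-- ===== VERDICT (by name: the statement is the Claim_ definition above) =====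
theorem strToT9_spec : Claim_equal_strToT9 := by
  intro s _ hpre
  unfold Spec_strToT9 strToT9 strToT9_alt
  by_cases hd : PySem.Str.strIsdigit s
  · rw [if_pos hd, if_pos hd]
  · rw [if_neg hd, if_neg hd]
    have hall : ∀ c ∈ s.toList, c ∈ t9AllowedChars := by
      rcases hpre with h | h
      · exact absurd h (by simpa using hd)
      · intro c hc
        have := List.all_eq_true.1 h c hc
        simpa using this
    obtain ⟨ds, hds, hlen, hone, heq⟩ := mainB s.toList hall
    dsimp only
    rw [foldlA, List.nil_append, heq, hds]
    rw [strjoin_len ds hone, PySem.Str.len_eq, hlen]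
    simp
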